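-- pv_equiv track=rewrite | github.com/keithrozario/advent-of-code | 2024/08/test.py | find_antinodes
-- ===== SOURCE A (Python) =====
-- import itertools
--
-- def check_bounds(point: tuple[int,int], height, width)->bool:
--
--     if 0<= point[0] < width and 0 <= point[1] < height:
--         return True
--
--     return False
--
-- def get_pair_antinodes(a1: tuple[int,int], a2: tuple[int,int], height: int, width: int):
--
--     antinodes = []
--
--     dx = a1[0]-a2[0]
--     dy = a1[1]-a2[1]
--     a3 = (a1[0] + dx, a1[1]+dy)
--     a4 = (a2[0] - dx, a2[1]-dy)
--
--     for point in (a3,a4):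
--         if check_bounds(point, height, width):
--             antinodes.append(point)
--
--     return antinodes
--
-- def get_pair_antinodes_part_2(a1: tuple[int,int], a2: tuple[int,int], height: int, width: int):
--
--     antinodes = []
--
--     dx = a1[0]-a2[0]
--     dy = a1[1]-a2[1]
--
--     # go positive direction +dx +dy
--     point = a1
--     while True:
--         point = (point[0] + dx, point[1] + dy)
--         if check_bounds(point, height, width):
--             antinodes.append(point)
--         else:
--             break
--
--     # go negative direction -dx -dy
--     point = a2
--     while True:
--         point = (point[0] - dx, point[1] - dy)
--         if check_bounds(point, height, width):
--             antinodes.append(point)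
--         else:
--             break
--
--     return antinodes
--
-- def find_antinodes(character_coords: dict, height: int, width: int):
--     antinodes = []
--     antinodes_part_2 = []
--     for char in character_coords:
--         locations = character_coords[char]
--         pairs = list(itertools.combinations(locations, 2))
--         for pair in pairs:
--             antinodes.extend(get_pair_antinodes(pair[0], pair[1], height, width))
--
--             # Part 2
--             part_2_antinodes = get_pair_antinodes_part_2(pair[0], pair[1], height, width)
--             antinodes_part_2.extend(part_2_antinodes)
--             antinodes_part_2.extend(pair)
--
--     # de-duplicate
--     de_duplicate_antinodes = set(antinodes)
--     de_duplicate_antinodes_part_2 = set(antinodes_part_2)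
--
--     return de_duplicate_antinodes, de_duplicate_antinodes_part_2
-- ===== SOURCE B (Python) =====
-- def find_antinodes(character_coords: dict, height: int, width: int):
--     part1, part2 = [], []
--     for locations in character_coords.values():
--         n = len(locations)
--         for i in range(n):
--             for j in range(i + 1, n):
--                 a1, a2 = locations[i], locations[j]
--                 dx, dy = a1[0] - a2[0], a1[1] - a2[1]
--                 # one ray per direction: instead of stepping until out of bounds,
--                 # compute the ray length kmax in closed form and list the points.
--                 for (sx, sy), ddx, ddy in ((a1, dx, dy), (a2, -dx, -dy)):
--                     if not (0 <= sx + ddx < width and 0 <= sy + ddy < height):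
--                         continue
--                     part1.append((sx + ddx, sy + ddy))
--                     lims = []
--                     if ddx > 0:
--                         lims.append((width - 1 - sx) // ddx)
--                     elif ddx < 0:
--                         lims.append(sx // (-ddx))
--                     if ddy > 0:
--                         lims.append((height - 1 - sy) // ddy)
--                     elif ddy < 0:
--                         lims.append(sy // (-ddy))
--                     kmax = min(lims) if lims else 1
--                     part2.extend((sx + k * ddx, sy + k * ddy) for k in range(1, kmax + 1))
--                 part2.extend((a1, a2))
--     return set(part1), set(part2)
-- ===== Notes on version B (the rewrite author's own statement) =====
-- stated objective: alternative
-- what changed: Replaces A's step-and-test while loops (and itertools.combinations) by a closed-form ray length: per direction B computes kmax from per-axis floor-division limits and emits the ray as range(1, kmax+1), the first point doubling as the Part-1 antinode.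
import Mathlib
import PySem

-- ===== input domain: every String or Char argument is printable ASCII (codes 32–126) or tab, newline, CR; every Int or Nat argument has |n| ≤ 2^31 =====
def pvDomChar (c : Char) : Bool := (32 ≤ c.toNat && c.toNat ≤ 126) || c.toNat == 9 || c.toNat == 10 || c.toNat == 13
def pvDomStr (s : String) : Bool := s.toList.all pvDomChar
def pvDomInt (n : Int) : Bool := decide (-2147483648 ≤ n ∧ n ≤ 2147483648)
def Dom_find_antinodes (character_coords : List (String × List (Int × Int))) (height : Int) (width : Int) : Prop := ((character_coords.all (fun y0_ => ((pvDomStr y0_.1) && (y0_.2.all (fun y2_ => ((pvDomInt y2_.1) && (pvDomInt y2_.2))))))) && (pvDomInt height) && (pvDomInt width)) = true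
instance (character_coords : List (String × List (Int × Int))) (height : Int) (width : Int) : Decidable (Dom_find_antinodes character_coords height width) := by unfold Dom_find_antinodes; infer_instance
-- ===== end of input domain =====

-- B replaces A's step-and-test while loops by closed-form ray lengths: per direction it
-- computes kmax from per-axis floor-division limits and emits the ray as range(1, kmax+1),
-- whose first point is the Part-1 antinode; index pairs replace itertools.combinations.


-- Fuel for the Python 'while True' walks: with a nonzero step a walk visits at most
-- width + height in-bounds points before leaving the grid, so this budget is never
-- exhausted on inputs admitted by Pre_ (where every zero-step pair starts out of bounds).
def pvFuel (height width : Int) : Nat := width.toNat + height.toNat + 2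

-- ===== PORT A =====
def pvCheckBounds (point : Int × Int) (height width : Int) : Bool :=
  decide (0 ≤ point.1 ∧ point.1 < width ∧ 0 ≤ point.2 ∧ point.2 < height)

def pvGetPairAntinodes (a1 a2 : Int × Int) (height width : Int) : List (Int × Int) :=
  let dx := a1.1 - a2.1
  let dy := a1.2 - a2.2
  let a3 := (a1.1 + dx, a1.2 + dy)
  let a4 := (a2.1 - dx, a2.2 - dy)
  [a3, a4].foldl (fun acc p => if pvCheckBounds p height width then acc ++ [p] else acc) []

-- the '+dx +dy' while loop of get_pair_antinodes_part_2 (fuel-bounded, see pvFuel)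
def pvLoopPos (dx dy height width : Int) : Nat → (Int × Int) → List (Int × Int) → List (Int × Int)
  | 0, _, acc => acc
  | fuel + 1, point, acc =>
    let q := (point.1 + dx, point.2 + dy)
    if pvCheckBounds q height width then pvLoopPos dx dy height width fuel q (acc ++ [q]) else acc

-- the '-dx -dy' while loop of get_pair_antinodes_part_2
def pvLoopNeg (dx dy height width : Int) : Nat → (Int × Int) → List (Int × Int) → List (Int × Int)
  | 0, _, acc => acc
  | fuel + 1, point, acc =>
    let q := (point.1 - dx, point.2 - dy)
    if pvCheckBounds q height width then pvLoopNeg dx dy height width fuel q (acc ++ [q]) else acc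

def pvGetPairAntinodesPart2 (a1 a2 : Int × Int) (height width : Int) : List (Int × Int) :=
  let dx := a1.1 - a2.1
  let dy := a1.2 - a2.2
  let antinodes := pvLoopPos dx dy height width (pvFuel height width) a1 []
  pvLoopNeg dx dy height width (pvFuel height width) a2 antinodes

def find_antinodes (character_coords : List (String × List (Int × Int))) (height : Int) (width : Int) : (List (Int × Int)) × (List (Int × Int)) :=
  let d := PySem.Dict.ofList character_coords
  let st :=
    d.items.foldl (fun (st : List (Int × Int) × List (Int × Int)) kv =>
      let pairs := PySem.List.combinations kv.2 2
      pairs.foldl (fun st pr =>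
        match pr with
        | p :: q :: _ =>
          (st.1 ++ pvGetPairAntinodes p q height width,
           st.2 ++ (pvGetPairAntinodesPart2 p q height width ++ [p, q]))
        | _ => st) st) ([], [])
  (PySem.Set.ofList st.1, PySem.Set.ofList st.2)

-- ===== PORT B =====
def pvBoundsB (x y height width : Int) : Bool :=
  decide (0 ≤ x ∧ x < width ∧ 0 ≤ y ∧ y < height)

-- the per-axis limits list 'lims' of Source B
def pvLims (sx sy ddx ddy height width : Int) : List Int :=
  (if ddx > 0 then [PySem.Int.floordiv (width - 1 - sx) ddx]
   else if ddx < 0 then [PySem.Int.floordiv sx (-ddx)] else [])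
  ++
  (if ddy > 0 then [PySem.Int.floordiv (height - 1 - sy) ddy]
   else if ddy < 0 then [PySem.Int.floordiv sy (-ddy)] else [])

-- 'kmax = min(lims) if lims else 1'
def pvKmax (sx sy ddx ddy height width : Int) : Int :=
  match PySem.List.min? (pvLims sx sy ddx ddy height width) (fun x => x) with
  | some m => m
  | none => 1

-- one direction of Source B's inner loop: (part-1 additions, part-2 additions)
def pvDir (sx sy ddx ddy height width : Int) : List (Int × Int) × List (Int × Int) :=
  if pvBoundsB (sx + ddx) (sy + ddy) height width then
    ([(sx + ddx, sy + ddy)],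
     (PySem.List.pyRange 1 (pvKmax sx sy ddx ddy height width + 1) 1).map
       (fun k => (sx + k * ddx, sy + k * ddy)))
  else ([], [])

-- one pair of Source B: both directions, then the endpoints into part 2
def pvPairB (a1 a2 : Int × Int) (height width : Int) : List (Int × Int) × List (Int × Int) :=
  let dx := a1.1 - a2.1
  let dy := a1.2 - a2.2
  let d1 := pvDir a1.1 a1.2 dx dy height width
  let d2 := pvDir a2.1 a2.2 (-dx) (-dy) height width
  (d1.1 ++ d2.1, d1.2 ++ d2.2 ++ [a1, a2])

-- all index pairs i < j, in order
def pvAllPairs : List (Int × Int) → List ((Int × Int) × (Int × Int))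
  | [] => []
  | x :: xs => xs.map (fun y => (x, y)) ++ pvAllPairs xs

def find_antinodes_alt (character_coords : List (String × List (Int × Int))) (height : Int) (width : Int) : (List (Int × Int)) × (List (Int × Int)) :=
  let d := PySem.Dict.ofList character_coords
  let st :=
    d.values.foldl (fun (st : List (Int × Int) × List (Int × Int)) locs =>
      (pvAllPairs locs).foldl (fun st pr =>
        let pn := pvPairB pr.1 pr.2 height width
        (st.1 ++ pn.1, st.2 ++ pn.2)) st) ([], [])
  (PySem.Set.ofList st.1, PySem.Set.ofList st.2)

-- ===== PRECONDITION & SPEC =====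
-- Pre_ excludes exactly the inputs on which Python A never returns: a repeated coordinate
-- inside one character's (dict-effective) list that lies in bounds makes A's zero-step
-- 'while True' loop in get_pair_antinodes_part_2 run forever.
def Pre_find_antinodes (character_coords : List (String × List (Int × Int))) (height : Int) (width : Int) : Prop :=
  ∀ kv ∈ (PySem.Dict.ofList character_coords).items, ∀ p ∈ kv.2,
    1 < kv.2.count p → ¬ (0 ≤ p.1 ∧ p.1 < width ∧ 0 ≤ p.2 ∧ p.2 < height)
instance (character_coords : List (String × List (Int × Int))) (height : Int) (width : Int) : Decidable (Pre_find_antinodes character_coords height width) := by unfold Pre_find_antinodes; infer_instance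

def pvWitness_find_antinodes : (List (String × List (Int × Int))) × Int × Int :=
  ([("a", [(0, 0), (2, 1)]), ("b", [(1, 3)])], 4, 4)

def Spec_find_antinodes (character_coords : List (String × List (Int × Int))) (height : Int) (width : Int) (out : (List (Int × Int)) × (List (Int × Int))) : Prop := out = find_antinodes_alt character_coords height width
instance (character_coords : List (String × List (Int × Int))) (height : Int) (width : Int) (out : (List (Int × Int)) × (List (Int × Int))) : Decidable (Spec_find_antinodes character_coords height width out) := by unfold Spec_find_antinodes; infer_instance

-- ===== CLAIM (what is proved, stated in full; the proofs are below) =====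
def Claim_equal_find_antinodes : Prop := ∀ (character_coords : List (String × List (Int × Int))) (height : Int) (width : Int), Dom_find_antinodes character_coords height width → Pre_find_antinodes character_coords height width → Spec_find_antinodes character_coords height width (find_antinodes character_coords height width)

-- ===== LEMMAS AND PROOFS =====

theorem pvBoundsB_eq (x y height width : Int) :
    pvBoundsB x y height width = pvCheckBounds (x, y) height width := rfl

-- the loops are accumulator loops
theorem pvLoopPos_acc (dx dy height width : Int) :
    ∀ (fuel : Nat) (p : Int × Int) (acc : List (Int × Int)),
      pvLoopPos dx dy height width fuel p acc = acc ++ pvLoopPos dx dy height width fuel p [] := by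
  intro fuel
  induction fuel with
  | zero => intro p acc; simp [pvLoopPos]
  | succ f ih =>
    intro p acc
    simp only [pvLoopPos]
    split
    · rw [ih _ (acc ++ _), ih _ ([] ++ _)]; simp
    · simp

theorem pvLoopNeg_eq_pos (dx dy height width : Int) :
    ∀ (fuel : Nat) (p : Int × Int) (acc : List (Int × Int)),
      pvLoopNeg dx dy height width fuel p acc = pvLoopPos (-dx) (-dy) height width fuel p acc := by
  intro fuel
  induction fuel with
  | zero => intro p acc; simp [pvLoopNeg, pvLoopPos]
  | succ f ih =>
    intro p acc
    simp only [pvLoopNeg, pvLoopPos, sub_eq_add_neg]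
    split <;> simp [ih]

-- per-axis closed forms: for k ≥ 1 and an in-bounds first step, the in-bounds condition
-- along one axis is exactly 'k ≤ limit'
theorem pvAxis_pos (s d bnd k : Int) (hd : 0 < d) (h0 : 0 ≤ s + d) (_h1 : s + d < bnd) (hk : 1 ≤ k) :
    (0 ≤ s + k * d ∧ s + k * d < bnd) ↔ k ≤ PySem.Int.floordiv (bnd - 1 - s) d := by
  rw [PySem.Int.le_floordiv_iff_mul_le hd]
  constructor
  · intro h; nlinarith [h.2]
  · intro h
    constructor
    · nlinarith [mul_nonneg (sub_nonneg.mpr hk) hd.le]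
    · nlinarith

theorem pvAxis_neg (s d bnd k : Int) (hd : d < 0) (_h0 : 0 ≤ s + d) (h1 : s + d < bnd) (hk : 1 ≤ k) :
    (0 ≤ s + k * d ∧ s + k * d < bnd) ↔ k ≤ PySem.Int.floordiv s (-d) := by
  rw [PySem.Int.le_floordiv_iff_mul_le (by omega : (0:Int) < -d)]
  constructor
  · intro h; nlinarith [h.1]
  · intro h
    constructor
    · nlinarith
    · nlinarith [mul_nonpos_of_nonneg_of_nonpos (sub_nonneg.mpr hk) hd.le]

-- for k ≥ 1 (with the first step in bounds) in-bounds ↔ k is below every limit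
theorem pvBounds_iff_lims (sx sy ddx ddy height width k : Int)
    (h1 : pvBoundsB (sx + ddx) (sy + ddy) height width = true) (hk : 1 ≤ k) :
    pvBoundsB (sx + k * ddx) (sy + k * ddy) height width = true ↔
      ∀ L ∈ pvLims sx sy ddx ddy height width, k ≤ L := by
  simp only [pvBoundsB, decide_eq_true_eq] at h1 ⊢
  obtain ⟨hx0, hx1, hy0, hy1⟩ := h1
  have hx : (0 ≤ sx + k * ddx ∧ sx + k * ddx < width) ↔
      ∀ L ∈ (if ddx > 0 then [PySem.Int.floordiv (width - 1 - sx) ddx]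
             else if ddx < 0 then [PySem.Int.floordiv sx (-ddx)] else []), k ≤ L := by
    rcases lt_trichotomy ddx 0 with h | h | h
    · simp [h, h.not_gt, pvAxis_neg sx ddx width k h hx0 hx1 hk]
    · subst h; simp; omega
    · simp [h, pvAxis_pos sx ddx width k h hx0 hx1 hk]
  have hy : (0 ≤ sy + k * ddy ∧ sy + k * ddy < height) ↔
      ∀ L ∈ (if ddy > 0 then [PySem.Int.floordiv (height - 1 - sy) ddy]
             else if ddy < 0 then [PySem.Int.floordiv sy (-ddy)] else []), k ≤ L := by
    rcases lt_trichotomy ddy 0 with h | h | h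
    · simp [h, h.not_gt, pvAxis_neg sy ddy height k h hy0 hy1 hk]
    · subst h; simp; omega
    · simp [h, pvAxis_pos sy ddy height k h hy0 hy1 hk]
  constructor
  · intro ⟨a, b, c, d⟩ L hL
    simp only [pvLims, List.mem_append] at hL
    rcases hL with hL | hL
    · exact (hx.mp ⟨a, b⟩) L hL
    · exact (hy.mp ⟨c, d⟩) L hL
  · intro h
    have hxv := hx.mpr (fun L hL => h L (by simp [pvLims, List.mem_append, hL]))
    have hyv := hy.mpr (fun L hL => h L (by simp [pvLims, List.mem_append, hL]))
    exact ⟨hxv.1, hxv.2, hyv.1, hyv.2⟩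

-- every limit is at most width + height (given the first step is in bounds)
theorem pvLims_le (sx sy ddx ddy height width : Int)
    (h1 : pvBoundsB (sx + ddx) (sy + ddy) height width = true) :
    ∀ L ∈ pvLims sx sy ddx ddy height width, 1 ≤ L → L ≤ width + height := by
  simp only [pvBoundsB, decide_eq_true_eq] at h1
  obtain ⟨hx0, hx1, hy0, hy1⟩ := h1
  intro L hL hL1
  have hw : (1:Int) ≤ width := by omega
  have hh : (1:Int) ≤ height := by omega
  simp only [pvLims, List.mem_append] at hL
  rcases hL with hL | hL
  · rcases lt_trichotomy ddx 0 with h | h | h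
    · rw [if_neg (by omega : ¬ ddx > 0), if_pos h, List.mem_singleton] at hL
      subst hL
      have := (PySem.Int.le_floordiv_iff_mul_le (a := sx) (b := -ddx) (by omega)).mp le_rfl
      nlinarith
    · subst h; simp at hL
    · rw [if_pos h, List.mem_singleton] at hL
      subst hL
      have := (PySem.Int.le_floordiv_iff_mul_le (a := width - 1 - sx) (b := ddx) h).mp le_rfl
      nlinarith
  · rcases lt_trichotomy ddy 0 with h | h | h
    · rw [if_neg (by omega : ¬ ddy > 0), if_pos h, List.mem_singleton] at hL
      subst hL
      have := (PySem.Int.le_floordiv_iff_mul_le (a := sy) (b := -ddy) (by omega)).mp le_rfl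
      nlinarith
    · subst h; simp at hL
    · rw [if_pos h, List.mem_singleton] at hL
      subst hL
      have := (PySem.Int.le_floordiv_iff_mul_le (a := height - 1 - sy) (b := ddy) h).mp le_rfl
      nlinarith

-- the A-side loop, started at step m, yields exactly steps m+1 .. kmax
theorem pvLoop_eq_range (sx sy ddx ddy height width kmax : Int)
    (hin : ∀ k : Int, 1 ≤ k → k ≤ kmax →
      pvCheckBounds (sx + k * ddx, sy + k * ddy) height width = true)
    (hout : pvCheckBounds (sx + (kmax + 1) * ddx, sy + (kmax + 1) * ddy) height width = false) :
    ∀ (fuel : Nat) (m : Int) (acc : List (Int × Int)), 0 ≤ m → m ≤ kmax →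
      (kmax - m).toNat < fuel →
      pvLoopPos ddx ddy height width fuel (sx + m * ddx, sy + m * ddy) acc =
        acc ++ (PySem.List.pyRange (m + 1) (kmax + 1) 1).map
          (fun k => (sx + k * ddx, sy + k * ddy)) := by
  intro fuel
  induction fuel with
  | zero => intro m acc _ _ h; omega
  | succ f ih =>
    intro m acc hm0 hmk hf
    have hstep : ((sx + m * ddx + ddx, sy + m * ddy + ddy) : Int × Int)
        = (sx + (m + 1) * ddx, sy + (m + 1) * ddy) := by
      rw [Prod.mk.injEq]; exact ⟨by ring, by ring⟩
    simp only [pvLoopPos, hstep]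
    by_cases hcase : m = kmax
    · subst hcase
      rw [hout]
      simp [PySem.List.pyRange_one_eq_nil (by omega : kmax + 1 ≤ kmax + 1)]
    · have hmk' : m + 1 ≤ kmax := by omega
      rw [hin (m + 1) (by omega) hmk']
      simp only [if_true]
      rw [ih (m + 1) (acc ++ [(sx + (m + 1) * ddx, sy + (m + 1) * ddy)]) (by omega) hmk' (by omega)]
      rw [PySem.List.pyRange_one_cons (by omega : m + 1 < kmax + 1)]
      simp

-- one direction: A's walk equals B's closed-form ray, A's single-step test equals B's head
theorem pvDir_spec (sx sy ddx ddy height width : Int)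
    (hz : ddx = 0 → ddy = 0 → pvBoundsB sx sy height width = false) :
    pvLoopPos ddx ddy height width (pvFuel height width) (sx, sy) [] =
        (pvDir sx sy ddx ddy height width).2 ∧
    (if pvCheckBounds (sx + ddx, sy + ddy) height width then
        ([(sx + ddx, sy + ddy)] : List (Int × Int)) else []) =
        (pvDir sx sy ddx ddy height width).1 := by
  have hF : pvFuel height width = (width.toNat + height.toNat + 1) + 1 := by simp [pvFuel]
  by_cases h1 : pvBoundsB (sx + ddx) (sy + ddy) height width = true
  · -- first step in bounds; the step is nonzero (else hz is contradicted)
    have hd : ¬ (ddx = 0 ∧ ddy = 0) := by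
      rintro ⟨rfl, rfl⟩
      have hfalse := hz rfl rfl
      simp only [add_zero] at h1
      simp [h1] at hfalse
    -- lims is nonempty, so kmax = min lims
    have hlims : pvLims sx sy ddx ddy height width ≠ [] := by
      rcases lt_trichotomy ddx 0 with h | h | h
      · rw [pvLims, if_neg (by omega : ¬ ddx > 0), if_pos h]; simp
      · rcases lt_trichotomy ddy 0 with h' | h' | h'
        · rw [pvLims, if_neg (by omega : ¬ ddx > 0), if_neg (by omega : ¬ ddx < 0),
              if_neg (by omega : ¬ ddy > 0), if_pos h']; simp
        · exact absurd ⟨h, h'⟩ hd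
        · rw [pvLims, if_neg (by omega : ¬ ddx > 0), if_neg (by omega : ¬ ddx < 0), if_pos h']; simp
      · rw [pvLims, if_pos h]; simp
    obtain ⟨m, hm⟩ : ∃ m, PySem.List.min? (pvLims sx sy ddx ddy height width) (fun x => x) = some m := by
      cases hmin : PySem.List.min? (pvLims sx sy ddx ddy height width) (fun x => x) with
      | none => exact absurd ((PySem.List.min?_eq_none_iff _ _).mp hmin) hlims
      | some m => exact ⟨m, rfl⟩
    have hkm : pvKmax sx sy ddx ddy height width = m := by simp [pvKmax, hm]
    have hmem := PySem.List.min?_mem hm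
    have hmin := PySem.List.min?_isMin hm
    have hone : ∀ L ∈ pvLims sx sy ddx ddy height width, 1 ≤ L := by
      have := (pvBounds_iff_lims sx sy ddx ddy height width 1 h1 le_rfl).mp (by simpa using h1)
      simpa using this
    have hm1 : 1 ≤ m := hone m hmem
    have hin : ∀ k : Int, 1 ≤ k → k ≤ m →
        pvCheckBounds (sx + k * ddx, sy + k * ddy) height width = true := by
      intro k hk1 hkm'
      rw [← pvBoundsB_eq]
      exact (pvBounds_iff_lims sx sy ddx ddy height width k h1 hk1).mpr
        (fun L hL => le_trans hkm' (hmin L hL))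
    have hout : pvCheckBounds (sx + (m + 1) * ddx, sy + (m + 1) * ddy) height width = false := by
      rw [← pvBoundsB_eq]
      rw [Bool.eq_false_iff]
      intro hc
      have := (pvBounds_iff_lims sx sy ddx ddy height width (m + 1) h1 (by omega)).mp hc m hmem
      omega
    have hub : m ≤ width + height := pvLims_le sx sy ddx ddy height width h1 m hmem hm1
    have hwh : (1:Int) ≤ width ∧ (1:Int) ≤ height := by
      simp only [pvBoundsB, decide_eq_true_eq] at h1; omega
    have hloop := pvLoop_eq_range sx sy ddx ddy height width m hin hout (pvFuel height width)
      0 [] le_rfl (by omega) (by simp only [pvFuel]; omega)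
    constructor
    · have hs : ((sx, sy) : Int × Int) = (sx + 0 * ddx, sy + 0 * ddy) := by
        rw [Prod.mk.injEq]; exact ⟨by ring, by ring⟩
      rw [hs, hloop]
      simp [pvDir, h1, hkm]
    · have h1' : pvCheckBounds (sx + ddx, sy + ddy) height width = true := by
        rw [← pvBoundsB_eq]; exact h1
      simp [h1', pvDir, h1]
  · -- first step out of bounds: both sides empty
    rw [Bool.not_eq_true] at h1
    have h1' : pvCheckBounds (sx + ddx, sy + ddy) height width = false := by
      rw [← pvBoundsB_eq]; exact h1
    constructor
    · rw [hF]
      simp [pvLoopPos, h1', pvDir, h1]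
    · simp [h1', pvDir, h1]

-- per pair (with Pre_'s no-in-bounds-duplicate guarantee): A's part-1 and part-2
-- contributions equal B's
theorem pvPair_spec (a1 a2 : Int × Int) (height width : Int)
    (hne : a1 = a2 → pvCheckBounds a1 height width = false) :
    pvGetPairAntinodes a1 a2 height width = (pvPairB a1 a2 height width).1 ∧
    pvGetPairAntinodesPart2 a1 a2 height width ++ [a1, a2] = (pvPairB a1 a2 height width).2 := by
  have hz1 : a1.1 - a2.1 = 0 → a1.2 - a2.2 = 0 → pvBoundsB a1.1 a1.2 height width = false := by
    intro hx hy
    have : a1 = a2 := Prod.ext (by omega) (by omega)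
    rw [pvBoundsB_eq, Prod.mk.eta]
    exact hne this
  have hz2 : -(a1.1 - a2.1) = 0 → -(a1.2 - a2.2) = 0 → pvBoundsB a2.1 a2.2 height width = false := by
    intro hx hy
    have h12 : a1 = a2 := Prod.ext (by omega) (by omega)
    rw [pvBoundsB_eq, Prod.mk.eta, ← h12]
    exact hne h12
  have hd1 := pvDir_spec a1.1 a1.2 (a1.1 - a2.1) (a1.2 - a2.2) height width hz1
  have hd2 := pvDir_spec a2.1 a2.2 (-(a1.1 - a2.1)) (-(a1.2 - a2.2)) height width hz2
  have e4 : ((a2.1 + -(a1.1 - a2.1), a2.2 + -(a1.2 - a2.2)) : Int × Int)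
      = (a2.1 - (a1.1 - a2.1), a2.2 - (a1.2 - a2.2)) := by
    rw [Prod.mk.injEq]; exact ⟨by ring, by ring⟩
  constructor
  · -- Part 1
    simp only [pvGetPairAntinodes, List.foldl, pvPairB]
    rw [← hd1.2, ← hd2.2, e4]
    by_cases h3 : pvCheckBounds (a1.1 + (a1.1 - a2.1), a1.2 + (a1.2 - a2.2)) height width <;>
      by_cases h4 : pvCheckBounds (a2.1 - (a1.1 - a2.1), a2.2 - (a1.2 - a2.2)) height width <;>
      simp [h3, h4]
  · -- Part 2
    simp only [pvGetPairAntinodesPart2]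
    rw [pvLoopNeg_eq_pos, pvLoopPos_acc]
    have ha1 : ((a1.1, a1.2) : Int × Int) = a1 := Prod.mk.eta
    have ha2 : ((a2.1, a2.2) : Int × Int) = a2 := Prod.mk.eta
    rw [← ha1] at hd1 ⊢
    rw [← ha2] at hd2 ⊢
    rw [hd1.1, hd2.1]
    simp only [pvPairB]

-- combinations of size 2 are exactly the ordered index pairs
theorem pvCombinations_two_eq (xs : List (Int × Int)) :
    PySem.List.combinations xs 2 = (pvAllPairs xs).map (fun pr => [pr.1, pr.2]) := by
  induction xs with
  | nil => simp [PySem.List.combinations_nil_succ, pvAllPairs]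
  | cons x xs ih =>
    simp [PySem.List.combinations_cons_succ, PySem.List.combinations_one, pvAllPairs,
      List.map_map, ih, Function.comp]

-- a pair produced by combinations of a Pre_-admissible list has no in-bounds repetition
theorem pvPair_hne (locs : List (Int × Int)) (height width : Int)
    (hpre : ∀ p ∈ locs, 1 < locs.count p → ¬ (0 ≤ p.1 ∧ p.1 < width ∧ 0 ≤ p.2 ∧ p.2 < height))
    (pr : (Int × Int) × (Int × Int)) (hpr : pr ∈ pvAllPairs locs) :
    pr.1 = pr.2 → pvCheckBounds pr.1 height width = false := by
  intro heq
  have hsub : [pr.1, pr.2].Sublist locs := by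
    have : [pr.1, pr.2] ∈ PySem.List.combinations locs 2 := by
      rw [pvCombinations_two_eq]
      exact List.mem_map.mpr ⟨pr, hpr, rfl⟩
    exact PySem.List.sublist_of_mem_combinations this
  have hcount : 1 < locs.count pr.1 := by
    have := hsub.count_le pr.1
    rw [heq] at this ⊢
    simp at this
    omega
  have hmem : pr.1 ∈ locs := List.count_pos_iff.mp (by omega)
  have := hpre pr.1 hmem hcount
  simp only [pvCheckBounds, decide_eq_false_iff_not]
  exact this

-- the inner per-character fold of A equals B's
theorem pvInnerFold_eq (locs : List (Int × Int)) (height width : Int)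
    (hpre : ∀ p ∈ locs, 1 < locs.count p → ¬ (0 ≤ p.1 ∧ p.1 < width ∧ 0 ≤ p.2 ∧ p.2 < height))
    (st : List (Int × Int) × List (Int × Int)) :
    (PySem.List.combinations locs 2).foldl (fun st pr =>
        match pr with
        | p :: q :: _ =>
          (st.1 ++ pvGetPairAntinodes p q height width,
           st.2 ++ (pvGetPairAntinodesPart2 p q height width ++ [p, q]))
        | _ => st) st =
      (pvAllPairs locs).foldl (fun st pr =>
        let pn := pvPairB pr.1 pr.2 height width
        (st.1 ++ pn.1, st.2 ++ pn.2)) st := by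
  rw [pvCombinations_two_eq, List.foldl_map]
  apply PySem.List.foldl_congr_mem
  intro acc pr hpr
  simp only []
  have := pvPair_spec pr.1 pr.2 height width (pvPair_hne locs height width hpre pr hpr)
  rw [this.1, this.2]

-- ===== VERDICT (by name: the statement is the Claim_ definition above) =====
theorem find_antinodes_spec : Claim_equal_find_antinodes := by
  intro character_coords height width _ hpre
  unfold Spec_find_antinodes find_antinodes find_antinodes_alt
  have h1 := PySem.List.foldl_congr_mem
      ((PySem.Dict.ofList character_coords).items)
      (fun (st : List (Int × Int) × List (Int × Int)) kv =>
        (PySem.List.combinations kv.2 2).foldl (fun st pr =>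
          match pr with
          | p :: q :: _ =>
            (st.1 ++ pvGetPairAntinodes p q height width,
             st.2 ++ (pvGetPairAntinodesPart2 p q height width ++ [p, q]))
          | _ => st) st)
      (fun st kv =>
        (pvAllPairs kv.2).foldl (fun st pr =>
          (st.1 ++ (pvPairB pr.1 pr.2 height width).1,
           st.2 ++ (pvPairB pr.1 pr.2 height width).2)) st)
      (([], []))
      (fun acc kv hkv => pvInnerFold_eq kv.2 height width (fun p hp hc => hpre kv hkv p hp hc) acc)
  have h2 := @List.foldl_map (String × List (Int × Int)) (List (Int × Int))
      (List (Int × Int) × List (Int × Int))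
      (fun kv => kv.2)
      (fun st locs =>
        (pvAllPairs locs).foldl (fun st pr =>
          (st.1 ++ (pvPairB pr.1 pr.2 height width).1,
           st.2 ++ (pvPairB pr.1 pr.2 height width).2)) st)
      ((PySem.Dict.ofList character_coords).items) (([], []))
  exact congrArg (fun st : List (Int × Int) × List (Int × Int) =>
    (PySem.Set.ofList st.1, PySem.Set.ofList st.2)) (h1.trans h2.symm)
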